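-- pv_equiv track=rewrite | github.com/csbrown-noaa/hierarchical_loss | hierarchical_loss/tree_utils.py | trim_childparent_tree
-- ===== SOURCE A (Python) =====
-- from collections.abc import Iterator, Callable, Hashable
--
-- def find_closest_permitted_parent(
--     node: Hashable,
--     tree: dict[Hashable, Hashable],
--     permitted_nodes: set[Hashable],
-- ) -> Hashable | None:
--     """Finds the first ancestor of a node that is in a permitted set.
--
--     This function walks up the ancestral chain of a node (using the
--     {child: parent} tree) and returns the first ancestor it finds
--     that is present in the `permitted_nodes` set.
--
--     If no ancestor (including the node itself) is in the set,
--     or if the node is not in the tree to begin with, it returns None.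
--
--     Parameters
--     ----------
--     node : Hashable
--         The ID of the node to start searching from.
--     tree : dict[Hashable, Hashable]
--         A tree in {child: parent} format.
--     permitted_nodes : set[Hashable]
--         A set of node IDs that are considered "permitted".
--
--     Returns
--     -------
--     Hashable | None
--         The ID of the closest permitted ancestor, or None if none is found.
--
--     Examples
--     --------
--     >>> tree = {1: 2, 2: 3, 3: 4, 4: 5}
--     >>> permitted = {0, 2, 5}
--     >>> find_closest_permitted_parent(1, tree, permitted) # 1 -> 2 (permitted)
--     2
--     >>> find_closest_permitted_parent(0, tree, permitted) # 0 is not in tree keys, returns None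
--     >>> tree[0] = 1 # Add 0 to the tree
--     >>> find_closest_permitted_parent(0, tree, permitted) # 0 -> 1 -> 2 (permitted)
--     2
--     >>> tree = {10: 20, 20: 30, 30: 40}
--     >>> find_closest_permitted_parent(10, tree, {50, 60}) # No permitted ancestors, returns None
--     """
--     if node not in tree:
--         return None
--     parent = tree[node]
--     while parent not in permitted_nodes:
--         if parent in tree:
--             parent = tree[parent]
--         else:
--             return None
--     return parent
--
-- def trim_childparent_tree(
--     tree: dict[Hashable, Hashable], permitted_nodes: set[Hashable]
-- ) -> dict[Hashable, Hashable | None]: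
--     """Trims a {child: parent} tree to only include permitted nodes.
--
--     This function first remaps every node in the tree to its closest
--     permitted ancestor. It then filters this map, keeping only the
--     entries where the node (the key) is *also* in the `permitted_nodes`
--     set.
--
--     The result is a new {child: parent} tree containing *only*
--     permitted nodes, mapped to their closest permitted ancestor
--     (which will be another permitted node or None).
--
--     Parameters
--     ----------
--     tree : dict[Hashable, Hashable]
--         A tree in {child: parent} format.
--     permitted_nodes : set[Hashable]
--         A set of node IDs to keep.
--
--     Returns
--     -------
--     dict[Hashable, Hashable | None]
--         A new {child: parent} tree containing only permitted nodes,
--         each re-mapped to its closest permitted ancestor.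
--
--     Examples
--     --------
--     >>> tree = {0: 1, 1: 2, 2: 3, 3: 4, 4: 5} # 0->1->2->3->4->5
--     >>> permitted = {0, 2, 5} # 0, 2, and 5 are permitted
--     >>> trim_childparent_tree(tree, permitted)
--     {0: 2, 2: 5}
--     """
--     new_tree = {}
--     for node in tree:
--         closest_permitted_parent = find_closest_permitted_parent(node, tree, permitted_nodes)
--         new_tree[node] = closest_permitted_parent
--     for node in list(new_tree.keys()):
--         if new_tree[node] is None or (node not in permitted_nodes):
--             del new_tree[node]
--     return new_tree
-- ===== SOURCE B (Python) =====
-- def trim_childparent_tree(tree, permitted_nodes):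
--     # One pass with nearest-permitted-ancestor memoization: every node visited on an
--     # upward walk is cached with the walk's answer, so each tree node is walked at most once.
--     cache = {}
--
--     def resolve(start):
--         path = []
--         cur = start
--         while True:
--             if cur in cache:
--                 ans = cache[cur]
--                 break
--             if cur in permitted_nodes:
--                 ans = cur
--                 break
--             if cur not in tree:
--                 ans = None
--                 break
--             path.append(cur)
--             cur = tree[cur]
--         for q in path:
--             cache[q] = ans
--         return ans
--
--     out = {}
--     for node, parent in tree.items():
--         if node in permitted_nodes:
--             ans = resolve(parent)
--             if ans is not None:
--                 out[node] = ans
--     return out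
-- ===== Notes on version B (the rewrite author's own statement) =====
-- stated objective: alternative
-- what changed: A re-walks the ancestor chain from scratch for every tree node; B makes one pass that memoizes the nearest permitted ancestor of every node visited on a walk (nearest-marked-ancestor caching), so no ancestor chain is walked twice.
import Mathlib
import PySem

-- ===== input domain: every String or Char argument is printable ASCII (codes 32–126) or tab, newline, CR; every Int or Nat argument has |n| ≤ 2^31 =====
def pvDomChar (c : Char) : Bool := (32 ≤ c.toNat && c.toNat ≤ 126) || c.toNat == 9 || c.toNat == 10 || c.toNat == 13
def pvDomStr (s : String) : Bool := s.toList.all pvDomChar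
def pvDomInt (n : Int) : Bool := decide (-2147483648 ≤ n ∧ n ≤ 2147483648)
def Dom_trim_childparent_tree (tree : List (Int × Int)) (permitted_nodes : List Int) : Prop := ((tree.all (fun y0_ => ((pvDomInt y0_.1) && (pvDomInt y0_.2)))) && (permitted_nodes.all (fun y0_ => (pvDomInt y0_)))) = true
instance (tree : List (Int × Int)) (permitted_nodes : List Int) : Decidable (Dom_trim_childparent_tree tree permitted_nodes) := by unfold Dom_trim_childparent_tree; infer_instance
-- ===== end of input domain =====

-- B replaces A's independent O(h) upward walks (one per node) by a single memoized pass that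
-- caches the nearest permitted ancestor of every node visited on a walk; return values are equal
-- on Pre_ (outside Pre_ the Python A does not return: its while-loop runs forever).

-- ===== PORT A =====
-- the while-loop of find_closest_permitted_parent; the fuel argument only makes the recursion
-- total in Lean: on every input Pre_ admits, the walk stops before the fuel runs out
def pvWalk (tree : List (Int × Int)) (permitted_nodes : List Int) : Nat → Int → Option Int
  | 0, _ => none
  | fuel + 1, parent =>
    if parent ∈ permitted_nodes then some parent
    else
      match List.lookup parent tree with
      | some q => pvWalk tree permitted_nodes fuel q
      | none => none

-- find_closest_permitted_parent(node, tree, permitted_nodes)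
def pvFind (tree : List (Int × Int)) (permitted_nodes : List Int) (node : Int) : Option Int :=
  match List.lookup node tree with
  | none => none
  | some parent => pvWalk tree permitted_nodes (tree.length + 1) parent

-- new_tree = {}; for node in tree: new_tree[node] = find_closest_permitted_parent(node, ...)
def pvNewTree (tree : List (Int × Int)) (permitted_nodes : List Int) :
    PySem.Dict Int (Option Int) :=
  (tree.map Prod.fst).foldl
    (fun d node => d.insert node (pvFind tree permitted_nodes node)) PySem.Dict.empty

-- for node in list(new_tree.keys()): if new_tree[node] is None or node not in permitted: del
-- (getD is exact for new_tree[node]: the iterated node is still present when its turn comes)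
def pvTrimmed (tree : List (Int × Int)) (permitted_nodes : List Int) :
    PySem.Dict Int (Option Int) :=
  (pvNewTree tree permitted_nodes).keys.foldl
    (fun d node =>
      if d.getD node none = none ∨ node ∉ permitted_nodes then d.erase node else d)
    (pvNewTree tree permitted_nodes)

def trim_childparent_tree (tree : List (Int × Int)) (permitted_nodes : List Int) :
    List (Int × Int) :=
  -- the surviving values are all `some`; `.getD 0` only unwraps them (None values were deleted)
  (pvTrimmed tree permitted_nodes).items.map (fun p => (p.1, p.2.getD 0))

-- ===== PORT B =====
-- the `while True` collection loop of Source B's resolve; fuel only for totality (see pvWalk)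
def pvCollect (tree : List (Int × Int)) (permitted_nodes : List Int)
    (cache : PySem.Dict Int (Option Int)) : Nat → Int → List Int → List Int × Option Int
  | 0, _, path => (path, none)
  | fuel + 1, cur, path =>
    match cache.get? cur with
    | some ans => (path, ans)
    | none =>
      if cur ∈ permitted_nodes then (path, some cur)
      else
        match List.lookup cur tree with
        | none => (path, none)
        | some nxt => pvCollect tree permitted_nodes cache fuel nxt (path ++ [cur])

-- resolve(start): walk up collecting the path, then cache the answer for every path node
def pvResolve (tree : List (Int × Int)) (permitted_nodes : List Int)
    (cache : PySem.Dict Int (Option Int)) (start : Int) :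
    Option Int × PySem.Dict Int (Option Int) :=
  let r := pvCollect tree permitted_nodes cache (tree.length + 1) start []
  (r.2, r.1.foldl (fun c q => c.insert q r.2) cache)

def trim_childparent_tree_alt (tree : List (Int × Int)) (permitted_nodes : List Int) :
    List (Int × Int) :=
  -- out[node] = ans: the iterated keys of the Python dict are distinct, so each key is fresh
  -- and the dict build is an append
  (tree.foldl
      (fun (st : List (Int × Int) × PySem.Dict Int (Option Int)) p =>
        if p.1 ∈ permitted_nodes then
          let r := pvResolve tree permitted_nodes st.2 p.2
          match r.1 with
          | some v => (st.1 ++ [(p.1, v)], r.2)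
          | none => (st.1, r.2)
        else st)
      (([] : List (Int × Int)), (PySem.Dict.empty : PySem.Dict Int (Option Int)))).1

-- ===== PRECONDITION & SPEC =====
-- a non-empty set of child nodes, each of whose parents lies back inside the set: an upward walk
-- entering it never reaches a permitted node and never leaves the tree (a cycle trap)
def pvTrapped (tree : List (Int × Int)) (s : List Int) : Bool :=
  !s.isEmpty &&
    s.all (fun k =>
      match List.lookup k tree with
      | some v => s.contains v
      | none => false)

-- Pre_ excludes duplicate child keys (impossible for the Python dict argument) and trees with a
-- cycle of non-permitted nodes, on which Python A's while-loop (and B's) runs forever.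
def Pre_trim_childparent_tree (tree : List (Int × Int)) (permitted_nodes : List Int) : Prop :=
  (tree.map Prod.fst).Nodup ∧
    ∀ s ∈ ((tree.map Prod.fst).filter (fun k => !permitted_nodes.contains k)).sublists,
      pvTrapped tree s = false

instance (tree : List (Int × Int)) (permitted_nodes : List Int) :
    Decidable (Pre_trim_childparent_tree tree permitted_nodes) := by
  unfold Pre_trim_childparent_tree; infer_instance

def pvWitness_trim_childparent_tree : (List (Int × Int)) × List Int :=
  ([(0, 1), (1, 2), (2, 3), (3, 4), (4, 5)], [0, 2, 5])

def Spec_trim_childparent_tree (tree : List (Int × Int)) (permitted_nodes : List Int)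
    (out : List (Int × Int)) : Prop :=
  out = trim_childparent_tree_alt tree permitted_nodes

instance (tree : List (Int × Int)) (permitted_nodes : List Int) (out : List (Int × Int)) :
    Decidable (Spec_trim_childparent_tree tree permitted_nodes out) := by
  unfold Spec_trim_childparent_tree; infer_instance

-- ===== CLAIM (what is proved, stated in full; the proofs are below) =====
def Claim_equal_trim_childparent_tree : Prop :=
  ∀ (tree : List (Int × Int)) (permitted_nodes : List Int),
    Dom_trim_childparent_tree tree permitted_nodes →
      Pre_trim_childparent_tree tree permitted_nodes →
        Spec_trim_childparent_tree tree permitted_nodes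
          (trim_childparent_tree tree permitted_nodes)

-- ===== LEMMAS AND PROOFS =====

-- `List.lookup` on an association list with distinct keys finds a member pair's value
theorem pv_lookup_of_mem {l : List (Int × Int)} (hn : (l.map Prod.fst).Nodup)
    {n p : Int} (h : (n, p) ∈ l) : List.lookup n l = some p := by
  induction l with
  | nil => cases h
  | cons a t ih =>
    simp only [List.map_cons, List.nodup_cons] at hn
    rcases List.mem_cons.mp h with h | h
    · subst h; simp [List.lookup]
    · have hne : (n == a.1) = false := by
        refine beq_eq_false_iff_ne.mpr ?_
        rintro rfl
        exact hn.1 (List.mem_map.mpr ⟨(a.1, p), h, rfl⟩)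
      simpa [List.lookup, hne] using ih hn.2 h

theorem pv_mem_of_lookup {l : List (Int × Int)} {n p : Int}
    (h : List.lookup n l = some p) : (n, p) ∈ l := by
  induction l with
  | nil => simp [List.lookup] at h
  | cons a t ih =>
    by_cases he : n == a.1
    · simp only [List.lookup, he] at h
      obtain rfl : p = a.2 := by simpa using h.symm
      obtain rfl : n = a.1 := by simpa using he
      simp
    · simp only [List.lookup, he] at h
      exact List.mem_cons_of_mem _ (ih h)

-- `seen = [s₁, …, sₘ]` is a parent-walk ending at p: lookup sᵢ = some sᵢ₊₁, lookup sₘ = some p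
def pvChainTo (tree : List (Int × Int)) : List Int → Int → Prop
  | [], _ => True
  | [a], p => List.lookup a tree = some p
  | a :: b :: rest, p => List.lookup a tree = some b ∧ pvChainTo tree (b :: rest) p

theorem pvChainTo_suffix (tree : List (Int × Int)) :
    ∀ (u w : List Int) (p : Int), pvChainTo tree (u ++ w) p → pvChainTo tree w p := by
  intro u
  induction u with
  | nil => intro w p h; exact h
  | cons a u ih =>
    intro w p h
    apply ih
    cases hu : u ++ w with
    | nil => trivial
    | cons b rest =>
      rw [show (a :: u) ++ w = a :: (u ++ w) from rfl, hu] at h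
      exact h.2

theorem pvChainTo_snoc (tree : List (Int × Int)) :
    ∀ (seen : List Int) (p q : Int), pvChainTo tree seen p →
      List.lookup p tree = some q → pvChainTo tree (seen ++ [p]) q := by
  intro seen
  induction seen with
  | nil => intro p q _ hl; simpa [pvChainTo] using hl
  | cons a rest ih =>
    intro p q h hl
    cases rest with
    | nil =>
      simp only [pvChainTo] at h
      exact ⟨h, by simpa [pvChainTo] using hl⟩
    | cons b rest' =>
      exact ⟨h.1, ih p q h.2 hl⟩

theorem pvChainTo_closed (tree : List (Int × Int)) :
    ∀ (w : List Int) (p : Int), pvChainTo tree w p →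
      ∀ x ∈ w, ∃ y, List.lookup x tree = some y ∧ (y ∈ w ∨ y = p) := by
  intro w
  induction w with
  | nil => intro p _ x hx; cases hx
  | cons a rest ih =>
    intro p h x hx
    cases rest with
    | nil =>
      obtain rfl : x = a := by simpa using hx
      exact ⟨p, h, Or.inr rfl⟩
    | cons b rest' =>
      rcases List.mem_cons.mp hx with rfl | hx
      · exact ⟨b, h.1, Or.inl (by simp)⟩
      · obtain ⟨y, hy, hmem⟩ := ih p h.2 x hx
        exact ⟨y, hy, hmem.imp_left (List.mem_cons_of_mem a)⟩

-- a revisited node on a walk of non-permitted keys yields a trapped subset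
theorem pv_trap_of_cycle (tree : List (Int × Int)) (permitted_nodes : List Int)
    (seen : List Int) (p : Int)
    (hch : pvChainTo tree seen p) (hp : p ∈ seen)
    (hsub : seen ⊆ (tree.map Prod.fst).filter (fun k => !permitted_nodes.contains k)) :
    ∃ s ∈ ((tree.map Prod.fst).filter (fun k => !permitted_nodes.contains k)).sublists,
      pvTrapped tree s = true := by
  set C := (tree.map Prod.fst).filter (fun k => !permitted_nodes.contains k) with hC
  obtain ⟨u, v, rfl⟩ := List.append_of_mem hp
  have hw : pvChainTo tree (p :: v) p := pvChainTo_suffix tree u (p :: v) p hch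
  have hwsub : (p :: v) ⊆ C := fun x hx => hsub (by
    rcases List.mem_cons.mp hx with rfl | hx
    · exact List.mem_append_right u (List.mem_cons_self ..)
    · exact List.mem_append_right u (List.mem_cons_of_mem _ hx))
  refine ⟨C.filter (fun k => (p :: v).contains k), ?_, ?_⟩
  · exact List.mem_sublists.mpr (List.filter_sublist)
  · have hpmem : p ∈ C.filter (fun k => (p :: v).contains k) := by
      refine List.mem_filter.mpr ⟨hwsub (List.mem_cons_self ..), by simp⟩
    refine (Bool.and_eq_true ..).mpr ⟨?_, ?_⟩
    · cases h : (C.filter (fun k => (p :: v).contains k)) with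
      | nil => rw [h] at hpmem; cases hpmem
      | cons a t => simp
    · rw [List.all_eq_true]
      intro x hx
      have hx' := List.mem_filter.mp hx
      have hxw : x ∈ p :: v := by simpa using hx'.2
      obtain ⟨y, hy, hmem⟩ := pvChainTo_closed tree (p :: v) p hw x hxw
      have hyw : y ∈ p :: v := by
        rcases hmem with h | rfl
        · exact h
        · exact List.mem_cons_self ..
      rw [hy]
      simp only [List.contains_eq_mem, decide_eq_true_eq]
      exact List.mem_filter.mpr ⟨hwsub hyw, by simpa using hyw⟩

-- under Pre_'s no-trap condition, pvWalk is fuel-insensitive once the fuel covers the walk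
theorem pv_walk_ext (tree : List (Int × Int)) (permitted_nodes : List Int)
    (hT : ∀ s ∈ ((tree.map Prod.fst).filter (fun k => !permitted_nodes.contains k)).sublists,
        pvTrapped tree s = false) :
    ∀ (n : Nat) (seen : List Int) (p : Int) (f g : Nat), seen.Nodup →
      pvChainTo tree seen p →
      seen ⊆ (tree.map Prod.fst).filter (fun k => !permitted_nodes.contains k) →
      tree.length + 1 ≤ seen.length + n → n ≤ f → n ≤ g →
      pvWalk tree permitted_nodes f p = pvWalk tree permitted_nodes g p := by
  intro n
  induction n with
  | zero =>
    intro seen p f g hnd hch hsub hlen _ _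
    exfalso
    have h1 : seen.length
        ≤ ((tree.map Prod.fst).filter (fun k => !permitted_nodes.contains k)).length :=
      (List.subperm_of_subset hnd hsub).length_le
    have h2 : ((tree.map Prod.fst).filter (fun k => !permitted_nodes.contains k)).length
        ≤ tree.length := by
      calc _ ≤ (tree.map Prod.fst).length := List.length_filter_le _ _
        _ = tree.length := List.length_map ..
    omega
  | succ n ih =>
    intro seen p f g hnd hch hsub hlen hf hg
    obtain ⟨f', rfl⟩ : ∃ f', f = f' + 1 := ⟨f - 1, by omega⟩
    obtain ⟨g', rfl⟩ : ∃ g', g = g' + 1 := ⟨g - 1, by omega⟩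
    by_cases hperm : p ∈ permitted_nodes
    · simp [pvWalk, hperm]
    · cases hl : List.lookup p tree with
      | none => simp [pvWalk, hperm, hl]
      | some q =>
        have hpC : p ∈ (tree.map Prod.fst).filter (fun k => !permitted_nodes.contains k) :=
          List.mem_filter.mpr ⟨List.mem_map.mpr ⟨(p, q), pv_mem_of_lookup hl, rfl⟩, by
            simpa using hperm⟩
        by_cases hps : p ∈ seen
        · exfalso
          obtain ⟨s, hs, htrap⟩ := pv_trap_of_cycle tree permitted_nodes seen p hch hps hsub
          rw [hT s hs] at htrap; cases htrap
        · have step : ∀ m, pvWalk tree permitted_nodes (m + 1) p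
              = pvWalk tree permitted_nodes m q := by
            intro m; simp [pvWalk, hperm, hl]
          rw [step f', step g']
          refine ih (seen ++ [p]) q f' g' ?_ ?_ ?_ ?_ (by omega) (by omega)
          · rw [List.nodup_append]
            refine ⟨hnd, List.nodup_singleton p, ?_⟩
            intro a ha b hb hab
            obtain rfl : b = p := by simpa using hb
            exact hps (hab ▸ ha)
          · exact pvChainTo_snoc tree seen p q hch hl
          · intro x hx
            rcases List.mem_append.mp hx with hx | hx
            · exact hsub hx
            · obtain rfl : x = p := by simpa using hx
              exact hpC
          · simp only [List.length_append, List.length_cons, List.length_nil]; omega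

-- one non-permitted step of the walk, both ends at the canonical fuel
theorem pv_walk_step (tree : List (Int × Int)) (permitted_nodes : List Int)
    (hT : ∀ s ∈ ((tree.map Prod.fst).filter (fun k => !permitted_nodes.contains k)).sublists,
        pvTrapped tree s = false)
    (cur nxt : Int) (hperm : cur ∉ permitted_nodes) (hl : List.lookup cur tree = some nxt) :
    pvWalk tree permitted_nodes (tree.length + 1) cur
      = pvWalk tree permitted_nodes (tree.length + 1) nxt := by
  have h1 : pvWalk tree permitted_nodes (tree.length + 1) cur
      = pvWalk tree permitted_nodes tree.length nxt := by
    simp [pvWalk, hperm, hl]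
  have hcC : cur ∈ (tree.map Prod.fst).filter (fun k => !permitted_nodes.contains k) :=
    List.mem_filter.mpr ⟨List.mem_map.mpr ⟨(cur, nxt), pv_mem_of_lookup hl, rfl⟩, by
      simpa using hperm⟩
  have h2 := pv_walk_ext tree permitted_nodes hT tree.length [cur] nxt tree.length
    (tree.length + 1) (by simp) (by simpa [pvChainTo] using hl) (by simpa using hcC)
    (by simp) (by omega) (by omega)
  rw [h1, h2]

-- B's cache only ever holds true answers of A's walk
def pvCacheInv (tree : List (Int × Int)) (permitted_nodes : List Int)
    (cache : PySem.Dict Int (Option Int)) : Prop :=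
  ∀ k ans, cache.get? k = some ans → ans = pvWalk tree permitted_nodes (tree.length + 1) k

theorem pv_collect_spec (tree : List (Int × Int)) (permitted_nodes : List Int)
    (hT : ∀ s ∈ ((tree.map Prod.fst).filter (fun k => !permitted_nodes.contains k)).sublists,
        pvTrapped tree s = false)
    (cache : PySem.Dict Int (Option Int)) (hinv : pvCacheInv tree permitted_nodes cache) :
    ∀ (n : Nat) (cur : Int) (path : List Int) (f : Nat), path.Nodup →
      pvChainTo tree path cur →
      path ⊆ (tree.map Prod.fst).filter (fun k => !permitted_nodes.contains k) →
      (∀ x ∈ path, pvWalk tree permitted_nodes (tree.length + 1) x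
          = pvWalk tree permitted_nodes (tree.length + 1) cur) →
      tree.length + 1 ≤ path.length + n → n ≤ f →
      (pvCollect tree permitted_nodes cache f cur path).2
          = pvWalk tree permitted_nodes (tree.length + 1) cur ∧
        ∀ x ∈ (pvCollect tree permitted_nodes cache f cur path).1,
          pvWalk tree permitted_nodes (tree.length + 1) x
            = pvWalk tree permitted_nodes (tree.length + 1) cur := by
  intro n
  induction n with
  | zero =>
    intro cur path f hnd hch hsub hW hlen hf
    exfalso
    have h1 : path.length
        ≤ ((tree.map Prod.fst).filter (fun k => !permitted_nodes.contains k)).length :=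
      (List.subperm_of_subset hnd hsub).length_le
    have h2 : ((tree.map Prod.fst).filter (fun k => !permitted_nodes.contains k)).length
        ≤ tree.length := by
      calc _ ≤ (tree.map Prod.fst).length := List.length_filter_le _ _
        _ = tree.length := List.length_map ..
    omega
  | succ n ih =>
    intro cur path f hnd hch hsub hW hlen hf
    obtain ⟨f', rfl⟩ : ∃ f', f = f' + 1 := ⟨f - 1, by omega⟩
    simp only [pvCollect]
    cases hc : cache.get? cur with
    | some ans => exact ⟨hinv cur ans hc, hW⟩
    | none =>
      simp only
      by_cases hperm : cur ∈ permitted_nodes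
      · simp only [if_pos hperm]
        exact ⟨by simp [pvWalk, hperm], hW⟩
      · simp only [if_neg hperm]
        cases hl : List.lookup cur tree with
        | none => exact ⟨by simp [pvWalk, hperm, hl], hW⟩
        | some nxt =>
          have hcurC : cur ∈ (tree.map Prod.fst).filter (fun k => !permitted_nodes.contains k) :=
            List.mem_filter.mpr ⟨List.mem_map.mpr ⟨(cur, nxt), pv_mem_of_lookup hl, rfl⟩, by
              simpa using hperm⟩
          have hcur : cur ∉ path := by
            intro hmem
            obtain ⟨s, hs, htrap⟩ :=
              pv_trap_of_cycle tree permitted_nodes path cur hch hmem hsub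
            rw [hT s hs] at htrap; cases htrap
          have hstep := pv_walk_step tree permitted_nodes hT cur nxt hperm hl
          have := ih nxt (path ++ [cur]) f' ?_ ?_ ?_ ?_ ?_ (by omega)
          · exact ⟨this.1.trans hstep.symm, fun x hx => (this.2 x hx).trans hstep.symm⟩
          · rw [List.nodup_append]
            refine ⟨hnd, List.nodup_singleton cur, ?_⟩
            intro a ha b hb hab
            obtain rfl : b = cur := by simpa using hb
            exact hcur (hab ▸ ha)
          · exact pvChainTo_snoc tree path cur nxt hch hl
          · intro x hx
            rcases List.mem_append.mp hx with hx | hx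
            · exact hsub hx
            · obtain rfl : x = cur := by simpa using hx
              exact hcurC
          · intro x hx
            rcases List.mem_append.mp hx with hx | hx
            · exact (hW x hx).trans hstep
            · obtain rfl : x = cur := by simpa using hx
              exact hstep
          · simp only [List.length_append, List.length_cons, List.length_nil]; omega

theorem pv_inv_fold_insert (tree : List (Int × Int)) (permitted_nodes : List Int)
    (a : Option Int) :
    ∀ (xs : List Int) (cache : PySem.Dict Int (Option Int)),
      pvCacheInv tree permitted_nodes cache →
      (∀ x ∈ xs, a = pvWalk tree permitted_nodes (tree.length + 1) x) →
      pvCacheInv tree permitted_nodes (xs.foldl (fun c q => c.insert q a) cache) := by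
  intro xs
  induction xs with
  | nil => intro cache h _; exact h
  | cons x xs ih =>
    intro cache hinv hxs
    simp only [List.foldl_cons]
    refine ih _ ?_ (fun y hy => hxs y (List.mem_cons_of_mem x hy))
    intro k ans hk
    rw [PySem.Dict.get?_insert] at hk
    split at hk
    · next heq => cases hk; exact (hxs x (List.mem_cons_self ..)).trans (by rw [heq])
    · exact hinv k ans hk

theorem pv_resolve_spec (tree : List (Int × Int)) (permitted_nodes : List Int)
    (hT : ∀ s ∈ ((tree.map Prod.fst).filter (fun k => !permitted_nodes.contains k)).sublists,
        pvTrapped tree s = false)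
    (cache : PySem.Dict Int (Option Int)) (hinv : pvCacheInv tree permitted_nodes cache)
    (p : Int) :
    (pvResolve tree permitted_nodes cache p).1
        = pvWalk tree permitted_nodes (tree.length + 1) p ∧
      pvCacheInv tree permitted_nodes (pvResolve tree permitted_nodes cache p).2 := by
  have h := pv_collect_spec tree permitted_nodes hT cache hinv (tree.length + 1) p []
    (tree.length + 1) (by simp) trivial (by simp) (by simp) (by simp) (by omega)
  unfold pvResolve
  refine ⟨h.1, ?_⟩
  exact pv_inv_fold_insert tree permitted_nodes _ _ cache hinv
    (fun x hx => by rw [h.2 x hx, h.1])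

-- the common normal form both programs compute
def pvCanon (tree : List (Int × Int)) (permitted_nodes : List Int)
    (l : List (Int × Int)) : List (Int × Int) :=
  (l.filter (fun p => decide (p.1 ∈ permitted_nodes)
      && !(pvWalk tree permitted_nodes (tree.length + 1) p.2 == none))).map
    (fun p => (p.1, (pvWalk tree permitted_nodes (tree.length + 1) p.2).getD 0))

theorem pv_alt_loop (tree : List (Int × Int)) (permitted_nodes : List Int)
    (hT : ∀ s ∈ ((tree.map Prod.fst).filter (fun k => !permitted_nodes.contains k)).sublists,
        pvTrapped tree s = false) :
    ∀ (l : List (Int × Int)) (out : List (Int × Int)) (cache : PySem.Dict Int (Option Int)),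
      pvCacheInv tree permitted_nodes cache →
      (l.foldl
          (fun (st : List (Int × Int) × PySem.Dict Int (Option Int)) p =>
            if p.1 ∈ permitted_nodes then
              let r := pvResolve tree permitted_nodes st.2 p.2
              match r.1 with
              | some v => (st.1 ++ [(p.1, v)], r.2)
              | none => (st.1, r.2)
            else st)
          (out, cache)).1 = out ++ pvCanon tree permitted_nodes l := by
  intro l
  induction l with
  | nil => intro out cache _; simp [pvCanon]
  | cons p l ih =>
    intro out cache hinv
    obtain ⟨hr1, hr2⟩ := pv_resolve_spec tree permitted_nodes hT cache hinv p.2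
    simp only [List.foldl_cons]
    by_cases hperm : p.1 ∈ permitted_nodes
    · simp only [if_pos hperm]
      cases hw : pvWalk tree permitted_nodes (tree.length + 1) p.2 with
      | none =>
        rw [show (match (pvResolve tree permitted_nodes cache p.2).1 with
            | some v => (out ++ [(p.1, v)], (pvResolve tree permitted_nodes cache p.2).2)
            | none => (out, (pvResolve tree permitted_nodes cache p.2).2))
            = (out, (pvResolve tree permitted_nodes cache p.2).2) from by rw [hr1, hw]]
        rw [ih out _ hr2]
        simp [pvCanon, hperm, hw]
      | some v =>
        rw [show (match (pvResolve tree permitted_nodes cache p.2).1 with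
            | some v => (out ++ [(p.1, v)], (pvResolve tree permitted_nodes cache p.2).2)
            | none => (out, (pvResolve tree permitted_nodes cache p.2).2))
            = (out ++ [(p.1, v)], (pvResolve tree permitted_nodes cache p.2).2) from by
              rw [hr1, hw]]
        rw [ih _ _ hr2]
        simp [pvCanon, hperm, hw]
    · simp only [if_neg hperm]
      rw [ih out cache hinv]
      simp [pvCanon, hperm]

theorem pv_alt_eq_canon (tree : List (Int × Int)) (permitted_nodes : List Int)
    (hT : ∀ s ∈ ((tree.map Prod.fst).filter (fun k => !permitted_nodes.contains k)).sublists,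
        pvTrapped tree s = false) :
    trim_childparent_tree_alt tree permitted_nodes = pvCanon tree permitted_nodes tree := by
  unfold trim_childparent_tree_alt
  rw [pv_alt_loop tree permitted_nodes hT tree [] PySem.Dict.empty
    (fun k ans h => by rw [PySem.Dict.get?_empty] at h; cases h)]
  rw [List.nil_append]

-- A's deletion pass over the snapshot of keys = a filter of the items
theorem pv_erase_loop (permitted_nodes : List Int) :
    ∀ (rest done : List (Int × Option Int)) (d : PySem.Dict Int (Option Int)),
      d.items = done ++ rest → ((done ++ rest).map Prod.fst).Nodup →
      ((rest.map Prod.fst).foldl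
          (fun d node =>
            if d.getD node none = none ∨ node ∉ permitted_nodes then d.erase node else d)
          d).items
        = done ++ rest.filter (fun q => !(q.2 == none) && decide (q.1 ∈ permitted_nodes)) := by
  intro rest
  induction rest with
  | nil => intro done d hitems _; simpa using hitems
  | cons q rest ih =>
    intro done d hitems hnd
    simp only [List.map_cons, List.foldl_cons]
    have hkeys : d.keys.Nodup := by
      show (d.items.map Prod.fst).Nodup
      rw [hitems]; exact hnd
    have hmem : (q.1, q.2) ∈ d.items := by
      rw [hitems]; exact List.mem_append_right done (by simp)
    have hget : d.getD q.1 none = q.2 := PySem.Dict.getD_of_mem_items d hmem hkeys none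
    have hq1 : q.1 ∉ (done.map Prod.fst) ∧ q.1 ∉ (rest.map Prod.fst) := by
      have := hnd
      rw [List.map_append, List.nodup_append] at this
      constructor
      · intro hmem'
        exact this.2.2 _ hmem' _ (by simp) rfl
      · have h2 := this.2.1
        simp only [List.map_cons, List.nodup_cons] at h2
        exact h2.1
    by_cases hcond : d.getD q.1 none = none ∨ q.1 ∉ permitted_nodes
    · rw [if_pos hcond]
      have herase : (d.erase q.1).items = done ++ rest := by
        show d.items.filter (fun p => !p.1 == q.1) = done ++ rest
        rw [hitems, List.filter_append]
        have hd : done.filter (fun p => !p.1 == q.1) = done :=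
          List.filter_eq_self.mpr (fun a ha => by
            simp only [Bool.not_eq_eq_eq_not, Bool.not_true, beq_eq_false_iff_ne]
            intro h; exact hq1.1 (List.mem_map.mpr ⟨a, ha, h⟩))
        have hr : (q :: rest).filter (fun p => !p.1 == q.1) = rest := by
          simp only [List.filter_cons]
          rw [if_neg (by simp)]
          exact List.filter_eq_self.mpr (fun a ha => by
            simp only [Bool.not_eq_eq_eq_not, Bool.not_true, beq_eq_false_iff_ne]
            intro h; exact hq1.2 (List.mem_map.mpr ⟨a, ha, h⟩))
        rw [hd, hr]
      have hnd' : ((done ++ rest).map Prod.fst).Nodup := by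
        refine List.Nodup.sublist ?_ hnd
        refine List.Sublist.map _ ?_
        exact List.Sublist.append (List.Sublist.refl done) (List.sublist_cons_self q rest)
      rw [ih done (d.erase q.1) herase hnd']
      have hfq : (!(q.2 == none) && decide (q.1 ∈ permitted_nodes)) = false := by
        rcases hcond with h | h
        · rw [hget] at h; simp [h]
        · simp [h]
      rw [List.filter_cons, if_neg (by rw [hfq]; simp)]
    · rw [if_neg hcond]
      push Not at hcond
      rw [hget] at hcond
      have hnd2 : (((done ++ [q]) ++ rest).map Prod.fst).Nodup := by simpa using hnd
      rw [ih (done ++ [q]) d (by simpa using hitems) hnd2]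
      have hfq : (!(q.2 == none) && decide (q.1 ∈ permitted_nodes)) = true := by
        simp only [Bool.and_eq_true, Bool.not_eq_eq_eq_not, Bool.not_true, decide_eq_true_eq]
        exact ⟨beq_eq_false_iff_ne.mpr hcond.1, hcond.2⟩
      rw [List.filter_cons, if_pos (by rw [hfq])]
      simp

theorem pv_a_eq_canon (tree : List (Int × Int)) (permitted_nodes : List Int)
    (hn : (tree.map Prod.fst).Nodup) :
    trim_childparent_tree tree permitted_nodes = pvCanon tree permitted_nodes tree := by
  unfold trim_childparent_tree pvTrimmed pvNewTree
  have h1 : ((tree.map Prod.fst).foldl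
      (fun d node => d.insert node (pvFind tree permitted_nodes node))
      (PySem.Dict.empty : PySem.Dict Int (Option Int))).items
      = (tree.map Prod.fst).map (fun n => (n, pvFind tree permitted_nodes n)) := by
    have := PySem.Dict.items_foldl_insert_fresh (l := tree.map Prod.fst)
      (k := fun n => n) (v := fun n => pvFind tree permitted_nodes n)
      (d := (PySem.Dict.empty : PySem.Dict Int (Option Int)))
      (by intro a _; simp [PySem.Dict.contains_empty]) (by simpa using hn)
    simpa [PySem.Dict.empty] using this
  have hfind : ∀ p ∈ tree, pvFind tree permitted_nodes p.1
      = pvWalk tree permitted_nodes (tree.length + 1) p.2 := by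
    intro p hp
    have hl : List.lookup p.1 tree = some p.2 := pv_lookup_of_mem hn (by simpa using hp)
    simp [pvFind, hl]
  have hkeys1 : ((tree.map Prod.fst).foldl
      (fun d node => d.insert node (pvFind tree permitted_nodes node))
      (PySem.Dict.empty : PySem.Dict Int (Option Int))).keys = tree.map Prod.fst := by
    simp only [PySem.Dict.keys]
    rw [h1, List.map_map]
    simp
  rw [hkeys1]
  have h2 := pv_erase_loop permitted_nodes
    ((tree.map Prod.fst).map (fun n => (n, pvFind tree permitted_nodes n))) []
    ((tree.map Prod.fst).foldl
      (fun d node => d.insert node (pvFind tree permitted_nodes node))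
      (PySem.Dict.empty : PySem.Dict Int (Option Int)))
    (by simpa using h1) (by rw [List.nil_append, List.map_map]; simpa using hn)
  have hiter : ((tree.map Prod.fst).map
        (fun n => (n, pvFind tree permitted_nodes n))).map Prod.fst
      = tree.map Prod.fst := by rw [List.map_map]; simp
  rw [hiter] at h2
  rw [h2, List.nil_append, List.map_map, List.filter_map, List.map_map]
  unfold pvCanon
  have hfc : tree.filter ((fun q => !(q.2 == none) && decide (q.1 ∈ permitted_nodes)) ∘
        ((fun n => (n, pvFind tree permitted_nodes n)) ∘ Prod.fst))
      = tree.filter (fun p => decide (p.1 ∈ permitted_nodes)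
          && !(pvWalk tree permitted_nodes (tree.length + 1) p.2 == none)) := by
    refine List.filter_congr ?_
    intro p hp
    simp only [Function.comp_apply, hfind p hp]
    exact Bool.and_comm _ _
  rw [hfc]
  refine List.map_congr_left ?_
  intro p hp
  have hp' : p ∈ tree := List.mem_of_mem_filter hp
  simp only [Function.comp_apply, hfind p hp']

-- ===== VERDICT (by name: the statement is the Claim_ definition above) =====
theorem trim_childparent_tree_spec : Claim_equal_trim_childparent_tree := by
  intro tree permitted_nodes _hdom hpre
  unfold Spec_trim_childparent_tree
  rw [pv_a_eq_canon tree permitted_nodes hpre.1, pv_alt_eq_canon tree permitted_nodes hpre.2]
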